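-- pv_equiv track=rewrite | github.com/pater8715/scan-agent | src/scanagent/interpreter.py | _map_nikto_to_owasp
-- ===== SOURCE A (Python) =====
-- def _map_nikto_to_owasp(description: str) -> str:
--     """Mapea vulnerabilidad de Nikto a categoría OWASP Top 10."""
--     desc_lower = description.lower()
--
--     if any(word in desc_lower for word in ['sql injection', 'xss', 'injection']):
--         return "A03:2021 - Injection"
--     elif any(word in desc_lower for word in ['authentication', 'password', 'login']):
--         return "A07:2021 - Identification and Authentication Failures"
--     elif any(word in desc_lower for word in ['directory', 'admin', 'access']):
--         return "A01:2021 - Broken Access Control"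
--     elif any(word in desc_lower for word in ['configuration', 'header', 'server']):
--         return "A05:2021 - Security Misconfiguration"
--     elif any(word in desc_lower for word in ['outdated', 'version', 'vulnerable']):
--         return "A06:2021 - Vulnerable and Outdated Components"
--     else:
--         return "A05:2021 - Security Misconfiguration"
-- ===== SOURCE B (Python) =====
-- # Different algorithm: instead of an ordered if/elif cascade with early return,
-- # scan ALL keywords once, accumulating the MINIMUM priority among matches,
-- # then index into a category table.  Correct because A's branch order equals
-- # the priority order, so the first matching branch is the minimum-priority match.
-- KEYWORD_PRIORITY = {
--     'sql injection': 0, 'xss': 0, 'injection': 0,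
--     'authentication': 1, 'password': 1, 'login': 1,
--     'directory': 2, 'admin': 2, 'access': 2,
--     'configuration': 3, 'header': 3, 'server': 3,
--     'outdated': 4, 'version': 4, 'vulnerable': 4,
-- }
--
-- CATEGORIES = [
--     "A03:2021 - Injection",
--     "A07:2021 - Identification and Authentication Failures",
--     "A01:2021 - Broken Access Control",
--     "A05:2021 - Security Misconfiguration",
--     "A06:2021 - Vulnerable and Outdated Components",
--     "A05:2021 - Security Misconfiguration",   # default when nothing matches
-- ]
--
-- def _map_nikto_to_owasp(description: str) -> str:
--     desc_lower = description.lower()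
--     best = 5
--     for kw, pri in KEYWORD_PRIORITY.items():
--         if kw in desc_lower:
--             best = min(best, pri)
--     return CATEGORIES[best]
-- ===== Notes on version B (the rewrite author's own statement) =====
-- stated objective: alternative
-- what changed: Replaced the ordered if/elif cascade with early returns by a single exhaustive pass over a keyword->priority table that accumulates the minimum matched priority and indexes a category array; no short-circuit branch structure remains.
import Mathlib
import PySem

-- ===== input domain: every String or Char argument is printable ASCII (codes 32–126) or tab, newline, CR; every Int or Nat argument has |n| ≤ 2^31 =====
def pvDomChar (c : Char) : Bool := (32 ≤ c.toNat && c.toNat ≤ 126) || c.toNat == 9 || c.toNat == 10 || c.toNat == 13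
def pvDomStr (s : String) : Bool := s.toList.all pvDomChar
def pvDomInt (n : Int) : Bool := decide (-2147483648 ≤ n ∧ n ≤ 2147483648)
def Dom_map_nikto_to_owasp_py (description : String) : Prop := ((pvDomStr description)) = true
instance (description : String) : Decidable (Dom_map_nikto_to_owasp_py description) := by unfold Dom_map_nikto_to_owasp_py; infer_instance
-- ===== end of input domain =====

-- B replaces A's short-circuiting if/elif cascade by one exhaustive pass accumulating the
-- minimum matched priority over a keyword table, then indexing a category array (alternative).

-- ===== PORT A =====
def map_nikto_to_owasp_py (description : String) : String :=
  let descLower := PySem.Str.lower description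
  if ["sql injection", "xss", "injection"].any (fun w => PySem.Str.isIn w descLower) then
    "A03:2021 - Injection"
  else if ["authentication", "password", "login"].any (fun w => PySem.Str.isIn w descLower) then
    "A07:2021 - Identification and Authentication Failures"
  else if ["directory", "admin", "access"].any (fun w => PySem.Str.isIn w descLower) then
    "A01:2021 - Broken Access Control"
  else if ["configuration", "header", "server"].any (fun w => PySem.Str.isIn w descLower) then
    "A05:2021 - Security Misconfiguration"
  else if ["outdated", "version", "vulnerable"].any (fun w => PySem.Str.isIn w descLower) then
    "A06:2021 - Vulnerable and Outdated Components"
  else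
    "A05:2021 - Security Misconfiguration"

-- ===== PORT B =====
def owaspKeywordPriority : List (String × Nat) :=
  [ ("sql injection", 0), ("xss", 0), ("injection", 0),
    ("authentication", 1), ("password", 1), ("login", 1),
    ("directory", 2), ("admin", 2), ("access", 2),
    ("configuration", 3), ("header", 3), ("server", 3),
    ("outdated", 4), ("version", 4), ("vulnerable", 4) ]

def owaspCategories : List String :=
  [ "A03:2021 - Injection",
    "A07:2021 - Identification and Authentication Failures",
    "A01:2021 - Broken Access Control",
    "A05:2021 - Security Misconfiguration",
    "A06:2021 - Vulnerable and Outdated Components",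
    "A05:2021 - Security Misconfiguration" ]

def map_nikto_to_owasp_py_alt (description : String) : String :=
  let descLower := PySem.Str.lower description
  let best := owaspKeywordPriority.foldl
    (fun best kp => if PySem.Str.isIn kp.1 descLower then min best kp.2 else best) 5
  -- CATEGORIES[best]: best is always < 6, so getD never takes its default
  owaspCategories.getD best ""

-- ===== PRECONDITION & SPEC =====
def Spec_map_nikto_to_owasp_py (description : String) (out : String) : Prop := out = map_nikto_to_owasp_py_alt description
instance (description : String) (out : String) : Decidable (Spec_map_nikto_to_owasp_py description out) := by unfold Spec_map_nikto_to_owasp_py; infer_instance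

-- ===== CLAIM =====
def Claim_equal_map_nikto_to_owasp_py : Prop := ∀ (description : String), Dom_map_nikto_to_owasp_py description → Spec_map_nikto_to_owasp_py description (map_nikto_to_owasp_py description)

-- ===== LEMMAS AND PROOFS =====

-- folding a constant-priority group over the min accumulator
theorem owasp_group_fold (d : String) (p : Nat) (a : Nat) (kws : List String) :
    (kws.map (fun k => (k, p))).foldl
      (fun best kp => if PySem.Str.isIn kp.1 d then min best kp.2 else best) a
    = if kws.any (fun w => PySem.Str.isIn w d) then min a p else a := by
  induction kws generalizing a with
  | nil => simp
  | cons k rest ih =>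
    by_cases h : PySem.Str.isIn k d
    · simp only [List.map, List.foldl, List.any_cons, h, Bool.true_or, if_true, ih]
      split <;> [skip; rfl]
      omega
    · simp only [List.map, List.foldl, List.any_cons, h, Bool.false_or, ih]
      simp

theorem map_nikto_to_owasp_py_spec : Claim_equal_map_nikto_to_owasp_py := by
  intro description _
  unfold Spec_map_nikto_to_owasp_py map_nikto_to_owasp_py map_nikto_to_owasp_py_alt
  set d := PySem.Str.lower description with hd
  have hrules : owaspKeywordPriority
      = (["sql injection", "xss", "injection"].map (fun k => (k, 0)))
        ++ (["authentication", "password", "login"].map (fun k => (k, 1)))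
        ++ (["directory", "admin", "access"].map (fun k => (k, 2)))
        ++ (["configuration", "header", "server"].map (fun k => (k, 3)))
        ++ (["outdated", "version", "vulnerable"].map (fun k => (k, 4))) := by rfl
  rw [hrules]
  simp only [List.foldl_append, owasp_group_fold]
  by_cases g0 : ["sql injection", "xss", "injection"].any (fun w => PySem.Str.isIn w d) <;>
  by_cases g1 : ["authentication", "password", "login"].any (fun w => PySem.Str.isIn w d) <;>
  by_cases g2 : ["directory", "admin", "access"].any (fun w => PySem.Str.isIn w d) <;>
  by_cases g3 : ["configuration", "header", "server"].any (fun w => PySem.Str.isIn w d) <;>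
  by_cases g4 : ["outdated", "version", "vulnerable"].any (fun w => PySem.Str.isIn w d) <;>
    simp only [g0, g1, g2, g3, g4, reduceIte, Bool.false_eq_true] <;> rfl

-- ===== VERDICT =====
-- (theorem above states the claim by name)
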